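-- pv_equiv track=rewrite | github.com/Nidhin-Nelson/python_projects | 1_CSV_Report.py | last_tran
-- ===== SOURCE A (Python) =====
-- def last_tran(the_list):
--     max_date='0001-01-01'
--     max_name=None
--     for row in the_list:
--         if not row['Date']:
--             continue
--         if row['Date']>max_date:
--             max_date=row['Date']
--             max_name=row['Category']
--     return max_date,max_name
-- ===== SOURCE B (Python) =====
-- def last_tran(the_list):
--     valid = [r for r in the_list if r['Date'] and r['Date'] > '0001-01-01']
--     if not valid:
--         return '0001-01-01', None
--     row = sorted(valid, key=lambda r: r['Date'], reverse=True)[0]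
--     return row['Date'], row['Category']
-- ===== Notes on version B (the rewrite author's own statement) =====
-- stated objective: alternative
-- what changed: Replaces the incremental running-max loop by filter-then-stable-reverse-sort-then-pick-first; the stable reverse sort preserves A's first-wins rule on date ties and the filter preserves the '0001-01-01' baseline threshold.
import Mathlib
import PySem

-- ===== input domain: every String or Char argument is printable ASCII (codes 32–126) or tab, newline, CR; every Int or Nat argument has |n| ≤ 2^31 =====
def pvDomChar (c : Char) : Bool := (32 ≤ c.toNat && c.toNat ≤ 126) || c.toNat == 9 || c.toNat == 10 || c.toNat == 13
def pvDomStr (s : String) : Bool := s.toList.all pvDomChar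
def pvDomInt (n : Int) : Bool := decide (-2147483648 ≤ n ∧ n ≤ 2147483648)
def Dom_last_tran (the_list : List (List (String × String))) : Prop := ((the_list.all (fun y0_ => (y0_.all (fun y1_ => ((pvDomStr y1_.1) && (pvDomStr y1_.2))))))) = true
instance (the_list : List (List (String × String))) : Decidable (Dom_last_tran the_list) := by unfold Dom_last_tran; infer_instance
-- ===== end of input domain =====

-- B replaces A's incremental running-max loop by filter + stable reverse sort + pick the first row: a
-- genuinely different strategy of similar cost (the stable reverse sort keeps A's first-wins tie rule).

-- row['Date'] / row['Category'] as first-match association-list lookup; the default "" is only reached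
-- outside Pre_last_tran (Python raises KeyError there).
def pvDate (r : List (String × String)) : String := (List.lookup "Date" r).getD ""
def pvCat (r : List (String × String)) : String := (List.lookup "Category" r).getD ""

-- ===== PORT A =====
def last_tran (the_list : List (List (String × String))) : String × Option String :=
  the_list.foldl
    (fun st row =>
      if pvDate row = "" then st
      else if st.1 < pvDate row then (pvDate row, some (pvCat row))
      else st)
    ("0001-01-01", none)

-- ===== PORT B =====
-- the comprehension's condition, named: r['Date'] and r['Date'] > '0001-01-01'
def pvValid (r : List (String × String)) : Bool :=
  decide (pvDate r ≠ "") && decide (("0001-01-01" : String) < pvDate r)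

def last_tran_alt (the_list : List (List (String × String))) : String × Option String :=
  let valid := the_list.filter pvValid
  if valid.isEmpty then ("0001-01-01", none)
  else
    match PySem.List.sorted valid pvDate true with
    | [] => ("0001-01-01", none)   -- unreachable totality guard: sorted of a nonempty list is nonempty
    | row :: _ => (pvDate row, some (pvCat row))

-- ===== PRECONDITION & SPEC =====
-- Pre_ is exactly the inputs on which the Python A returns: every row has a 'Date' key, and every row
-- that strictly exceeds the running maximum (i.e. its date is > '0001-01-01' and > all earlier dates)
-- has a 'Category' key — only those rows' 'Category' is ever read by A.
def Pre_last_tran (the_list : List (List (String × String))) : Prop :=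
  ∀ i (hi : i < the_list.length),
    (List.lookup "Date" the_list[i]).isSome ∧
    ((("0001-01-01" : String).toList < (pvDate the_list[i]).toList ∧
        ∀ j (hj : j < i), (pvDate (the_list[j]'(lt_trans hj hi))).toList < (pvDate the_list[i]).toList) →
      (List.lookup "Category" the_list[i]).isSome)
instance (the_list : List (List (String × String))) : Decidable (Pre_last_tran the_list) := by unfold Pre_last_tran; infer_instance
def pvWitness_last_tran : (List (List (String × String))) :=
  [[("Date", "2021-03-05"), ("Category", "Food")], [("Date", ""), ("Category", "Gas")]]

def Spec_last_tran (the_list : List (List (String × String))) (out : String × Option String) : Prop := out = last_tran_alt the_list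
instance (the_list : List (List (String × String))) (out : String × Option String) : Decidable (Spec_last_tran the_list out) := by unfold Spec_last_tran; infer_instance

-- ===== CLAIM (what is proved, stated in full; the proofs are below) =====
def Claim_equal_last_tran : Prop := ∀ (the_list : List (List (String × String))), Dom_last_tran the_list → Pre_last_tran the_list → Spec_last_tran the_list (last_tran the_list)

-- ===== LEMMAS AND PROOFS =====

-- A's loop step and B's insertion step, named for the invariant proof.
def pvStepA (st : String × Option String) (row : List (String × String)) : String × Option String :=
  if pvDate row = "" then st
  else if st.1 < pvDate row then (pvDate row, some (pvCat row))
  else st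

def pvIns (x : List (String × String)) (acc : List (List (String × String))) :
    List (List (String × String)) :=
  PySem.List.insertBy (fun a b => decide (pvDate b < pvDate a)) x acc

-- the loop invariant relating A's state to B's accumulated (descending) list
def pvInv (acc : List (List (String × String))) (st : String × Option String) : Prop :=
  (acc = [] → st = ("0001-01-01", none)) ∧
  (∀ m t, acc = m :: t → st = (pvDate m, some (pvCat m)))

lemma pv_empty_lt (s : String) (h : s ≠ "") : ("" : String) < s := by
  rw [String.lt_iff_toList_lt]
  cases hl : s.toList with
  | nil => exact absurd (by rw [String.toList_eq_nil_iff] at hl; exact hl) h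
  | cons c cs =>
    show ([] : List Char) < c :: cs
    exact List.nil_lt_cons c cs

lemma pv_base_le_head (acc : List (List (String × String))) (st : String × Option String)
    (hinv : pvInv acc st) (hmem : ∀ r ∈ acc, ("0001-01-01" : String) < pvDate r) :
    ("0001-01-01" : String) ≤ st.1 := by
  cases acc with
  | nil => rw [hinv.1 rfl]
  | cons m t =>
    rw [hinv.2 m t rfl]
    exact le_of_lt (hmem m (List.mem_cons_self))

lemma pv_loop (l : List (List (String × String))) (acc : List (List (String × String)))
    (st : String × Option String) (hinv : pvInv acc st)
    (hmem : ∀ r ∈ acc, ("0001-01-01" : String) < pvDate r) :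
    pvInv ((l.filter pvValid).foldl (fun a x => pvIns x a) acc) (l.foldl pvStepA st) ∧
      (∀ r ∈ (l.filter pvValid).foldl (fun a x => pvIns x a) acc,
        ("0001-01-01" : String) < pvDate r) := by
  induction l generalizing acc st with
  | nil => exact ⟨hinv, hmem⟩
  | cons x l ih =>
    by_cases hp : pvValid x
    · -- x is kept by the filter; A updates iff st.1 < date x
      have hp' := hp
      simp only [pvValid, Bool.and_eq_true, decide_eq_true_eq] at hp'
      obtain ⟨hne, hbx⟩ := hp'
      have hfilter : (x :: l).filter pvValid = x :: l.filter pvValid := by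
        simp [List.filter, hp]
      rw [hfilter, List.foldl_cons, List.foldl_cons]
      have hmem' : ∀ r ∈ pvIns x acc, ("0001-01-01" : String) < pvDate r := by
        intro r hr
        rcases (PySem.List.mem_insertBy _ x r acc).mp hr with h | h
        · subst h; exact hbx
        · exact hmem r h
      refine ih (acc := pvIns x acc) (st := pvStepA st x) ?_ hmem'
      cases acc with
      | nil =>
        have hst : st = ("0001-01-01", none) := hinv.1 rfl
        have : pvStepA st x = (pvDate x, some (pvCat x)) := by
          simp [pvStepA, hst, hne, hbx]
        constructor
        · intro h; simp [pvIns, PySem.List.insertBy] at h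
        · intro m t hmt
          simp only [pvIns, PySem.List.insertBy] at hmt
          cases hmt
          simpa using this
      | cons m0 t0 =>
        have hst : st = (pvDate m0, some (pvCat m0)) := hinv.2 m0 t0 rfl
        by_cases hlt : pvDate m0 < pvDate x
        · have hins : pvIns x (m0 :: t0) = x :: m0 :: t0 := by
            simp [pvIns, PySem.List.insertBy, hlt]
          have hstep : pvStepA st x = (pvDate x, some (pvCat x)) := by
            simp [pvStepA, hst, hne, hlt]
          constructor
          · intro h; rw [hins] at h; cases h
          · intro m t hmt; rw [hins] at hmt
            injection hmt with h1 _; subst h1; exact hstep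
        · have hins : pvIns x (m0 :: t0) = m0 :: pvIns x t0 := by
            simp [pvIns, PySem.List.insertBy, hlt]
          have hstep : pvStepA st x = st := by
            simp only [pvStepA, hst]
            simp [hne, hlt]
          constructor
          · intro h; rw [hins] at h; cases h
          · intro m t hmt; rw [hins] at hmt
            injection hmt with h1 _; subst h1; rw [hstep, hst]
    · -- x is dropped by the filter; A's step leaves the state unchanged
      have hfilter : (x :: l).filter pvValid = l.filter pvValid := by
        simp [List.filter, hp]
      have hle : pvDate x ≤ "0001-01-01" := by
        by_cases hne : pvDate x = ""
        · rw [hne]; exact le_of_lt (pv_empty_lt _ (by decide))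
        · have : ¬ (("0001-01-01" : String) < pvDate x) := by
            intro hc; exact hp (by simp [pvValid, hne, hc])
          exact le_of_not_gt this
      have hstep : pvStepA st x = st := by
        by_cases hne : pvDate x = ""
        · simp [pvStepA, hne]
        · have hnlt : ¬ st.1 < pvDate x :=
            not_lt_of_ge (le_trans hle (pv_base_le_head acc st hinv hmem))
          simp [pvStepA, hne, hnlt]
      rw [hfilter, List.foldl_cons, hstep]
      exact ih acc st hinv hmem

-- ===== VERDICT (by name: the statement is the Claim_ definition above) =====
theorem last_tran_spec : Claim_equal_last_tran := by
  intro l _ _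
  unfold Spec_last_tran
  have h := pv_loop l [] ("0001-01-01", none)
    ⟨fun _ => rfl, fun m t h => by cases h⟩ (by intro r hr; cases hr)
  have hsorted : PySem.List.sorted (l.filter pvValid) pvDate true =
      (l.filter pvValid).foldl (fun a x => pvIns x a) [] :=
    PySem.List.sorted_rev_eq_foldl_insertBy _ _
  have hA : last_tran l = l.foldl pvStepA ("0001-01-01", none) := rfl
  rw [hA]
  by_cases hv : l.filter pvValid = []
  · have hnil : (l.filter pvValid).foldl (fun a x => pvIns x a) [] = [] := by rw [hv]; rfl
    rw [h.1.1 hnil]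
    simp [last_tran_alt, hv]
  · rcases hs : PySem.List.sorted (l.filter pvValid) pvDate true with _ | ⟨m, t⟩
    · exact absurd ((PySem.List.sorted_eq_nil_iff _ _ _).mp hs) hv
    · have hfold : (l.filter pvValid).foldl (fun a x => pvIns x a) [] = m :: t := by
        rw [← hsorted, hs]
      rw [h.1.2 m t hfold]
      simp [last_tran_alt, hv, hs]
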